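-- pv_equiv track=rewrite | github.com/gettheworkdone/genatator-pipeline | genatator_core.py | _nearest_motif_unbounded
-- ===== SOURCE A (Python) =====
-- from typing import Iterable, Iterator, Optional, Sequence
--
-- LEFT_SET = {"AG", "AC", "TG"}
--
-- RIGHT_SET = {"GT", "GC", "AT"}
--
-- def _rc2(two: str) -> str:
--     comp = {"A": "T", "T": "A", "C": "G", "G": "C"}
--     if len(two) != 2:
--         return "NN"
--     return comp.get(two[1], "N") + comp.get(two[0], "N")
--
-- def _has_boundary_motif(seq: str, interval_start: int, pos_abs: int, role: str, strand: str) -> bool: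
--     L = len(seq)
--     off = pos_abs - interval_start
--     if strand == "+":
--         if role == "first_end":
--             return (0 <= off <= L - 2) and (seq[off : off + 2] in RIGHT_SET)
--         return (2 <= off <= L) and (seq[off - 2 : off] in LEFT_SET)
--
--     if role == "first_end":
--         if not (0 <= off <= L - 2):
--             return False
--         return _rc2(seq[off : off + 2]) in LEFT_SET
--     if not (2 <= off <= L):
--         return False
--     return _rc2(seq[off - 2 : off]) in RIGHT_SET
--
-- def _nearest_motif_unbounded(
--     seq: str,
--     interval_start: int,
--     current_abs: int,
--     role: str,
--     strand: str,
--     lo_abs: int,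
--     hi_abs: int,
-- ) -> Optional[int]:
--     L = len(seq)
--     if role == "first_end":
--         lo_abs = max(lo_abs, interval_start)
--         hi_abs = min(hi_abs, interval_start + L - 2)
--     else:
--         lo_abs = max(lo_abs, interval_start + 2)
--         hi_abs = min(hi_abs, interval_start + L)
--     if lo_abs > hi_abs:
--         return None
--
--     d = 0
--     while True:
--         left = current_abs - d
--         right = current_abs + d
--         if lo_abs <= left <= hi_abs and _has_boundary_motif(seq, interval_start, left, role, strand):
--             return left
--         if d != 0 and lo_abs <= right <= hi_abs and _has_boundary_motif(seq, interval_start, right, role, strand):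
--             return right
--         if left <= lo_abs and right >= hi_abs:
--             return None
--         d += 1
-- ===== SOURCE B (Python) =====
-- from typing import Optional
--
-- LEFT_SET = {"AG", "AC", "TG"}
-- RIGHT_SET = {"GT", "GC", "AT"}
--
-- def _rc2(two: str) -> str:
--     comp = {"A": "T", "T": "A", "C": "G", "G": "C"}
--     if len(two) != 2:
--         return "NN"
--     return comp.get(two[1], "N") + comp.get(two[0], "N")
--
-- def _has_boundary_motif(seq: str, interval_start: int, pos_abs: int, role: str, strand: str) -> bool:
--     L = len(seq)
--     off = pos_abs - interval_start
--     if strand == "+":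
--         if role == "first_end":
--             return (0 <= off <= L - 2) and (seq[off : off + 2] in RIGHT_SET)
--         return (2 <= off <= L) and (seq[off - 2 : off] in LEFT_SET)
--     if role == "first_end":
--         if not (0 <= off <= L - 2):
--             return False
--         return _rc2(seq[off : off + 2]) in LEFT_SET
--     if not (2 <= off <= L):
--         return False
--     return _rc2(seq[off - 2 : off]) in RIGHT_SET
--
-- def _scan_left(seq, interval_start, role, strand, lo_abs, p):
--     # first motif position scanning downward from p to lo_abs
--     while p >= lo_abs:
--         if _has_boundary_motif(seq, interval_start, p, role, strand):
--             return p
--         p -= 1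
--     return None
--
-- def _scan_right(seq, interval_start, role, strand, hi_abs, p):
--     # first motif position scanning upward from p to hi_abs
--     while p <= hi_abs:
--         if _has_boundary_motif(seq, interval_start, p, role, strand):
--             return p
--         p += 1
--     return None
--
-- def _pick(current_abs, p_left, p_right):
--     if p_left is None:
--         return p_right
--     if p_right is None:
--         return p_left
--     return p_left if current_abs - p_left <= p_right - current_abs else p_right
--
-- def _nearest_motif_unbounded(seq, interval_start, current_abs, role, strand, lo_abs, hi_abs):
--     L = len(seq)
--     if role == "first_end":
--         lo_abs = max(lo_abs, interval_start)
--         hi_abs = min(hi_abs, interval_start + L - 2)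
--     else:
--         lo_abs = max(lo_abs, interval_start + 2)
--         hi_abs = min(hi_abs, interval_start + L)
--     if lo_abs > hi_abs:
--         return None
--     p_left = _scan_left(seq, interval_start, role, strand, lo_abs, min(current_abs, hi_abs))
--     p_right = _scan_right(seq, interval_start, role, strand, hi_abs, max(current_abs + 1, lo_abs))
--     return _pick(current_abs, p_left, p_right)
-- ===== Notes on version B (the rewrite author's own statement) =====
-- stated objective: alternative
-- what changed: Replaces A's single expanding-ring loop (distance d = 0,1,2,... checking left then right at equal distance) by two independent directional scans - nearest motif at or left of current_abs and nearest strictly right of it - combined at the end with a tie-to-left distance comparison.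
import Mathlib
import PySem

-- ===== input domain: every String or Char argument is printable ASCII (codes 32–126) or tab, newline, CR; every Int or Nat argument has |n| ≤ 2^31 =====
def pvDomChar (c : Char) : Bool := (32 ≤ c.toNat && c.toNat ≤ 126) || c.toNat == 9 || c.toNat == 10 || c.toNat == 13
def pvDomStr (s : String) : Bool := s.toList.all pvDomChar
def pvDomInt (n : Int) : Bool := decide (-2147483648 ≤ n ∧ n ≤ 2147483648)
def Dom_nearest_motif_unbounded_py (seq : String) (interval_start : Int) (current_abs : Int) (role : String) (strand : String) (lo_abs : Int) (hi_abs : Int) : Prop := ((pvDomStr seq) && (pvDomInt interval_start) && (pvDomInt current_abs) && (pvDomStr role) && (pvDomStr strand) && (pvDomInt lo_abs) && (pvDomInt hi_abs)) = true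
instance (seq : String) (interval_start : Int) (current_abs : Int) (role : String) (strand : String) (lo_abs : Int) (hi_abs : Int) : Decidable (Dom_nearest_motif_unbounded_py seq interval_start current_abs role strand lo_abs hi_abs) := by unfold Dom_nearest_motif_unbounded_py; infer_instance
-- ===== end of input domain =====

-- ===== PORT A =====
-- One honest line: B replaces A's expanding-ring search by two directional scans
-- combined with a tie-to-left distance comparison (alternative decomposition, same cost).
-- Shared module helpers (used by both Pythons): LEFT_SET, RIGHT_SET, _rc2, _has_boundary_motif.

def pvLEFT_SET : PySem.Set String := PySem.Set.ofList ["AG", "AC", "TG"]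

def pvRIGHT_SET : PySem.Set String := PySem.Set.ofList ["GT", "GC", "AT"]

def pvRc2 (two : String) : String :=
  let comp : PySem.Dict String String := PySem.Dict.ofList [("A", "T"), ("T", "A"), ("C", "G"), ("G", "C")]
  if PySem.Str.len two ≠ 2 then "NN"
  else
    PySem.Dict.getD comp (String.singleton (PySem.List.pyGetD two.toList 1 'N')) "N"
      ++ PySem.Dict.getD comp (String.singleton (PySem.List.pyGetD two.toList 0 'N')) "N"

def pvHasBoundaryMotif (seq : String) (interval_start : Int) (pos_abs : Int) (role : String) (strand : String) : Bool :=
  let L : Int := PySem.Str.len seq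
  let off : Int := pos_abs - interval_start
  if strand == "+" then
    if role == "first_end" then
      decide (0 ≤ off ∧ off ≤ L - 2) &&
        pvRIGHT_SET.contains (String.ofList (PySem.List.slice seq.toList (some off) (some (off + 2))))
    else
      decide (2 ≤ off ∧ off ≤ L) &&
        pvLEFT_SET.contains (String.ofList (PySem.List.slice seq.toList (some (off - 2)) (some off)))
  else if role == "first_end" then
    if ¬ (0 ≤ off ∧ off ≤ L - 2) then false
    else pvLEFT_SET.contains (pvRc2 (String.ofList (PySem.List.slice seq.toList (some off) (some (off + 2)))))
  else if ¬ (2 ≤ off ∧ off ≤ L) then false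
  else pvRIGHT_SET.contains (pvRc2 (String.ofList (PySem.List.slice seq.toList (some (off - 2)) (some off))))

-- A's `while True` ring loop over the motif predicate (the predicate is the partially
-- applied _has_boundary_motif; the loop state is exactly Python's d).
def pvLoopA (motif : Int → Bool) (current_abs lo_abs hi_abs : Int) (d : Nat) : Option Int :=
  if lo_abs ≤ current_abs - (d : Int) ∧ current_abs - (d : Int) ≤ hi_abs ∧ motif (current_abs - (d : Int)) = true then
    some (current_abs - (d : Int))
  else if d ≠ 0 ∧ lo_abs ≤ current_abs + (d : Int) ∧ current_abs + (d : Int) ≤ hi_abs ∧ motif (current_abs + (d : Int)) = true then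
    some (current_abs + (d : Int))
  else if current_abs - (d : Int) ≤ lo_abs ∧ hi_abs ≤ current_abs + (d : Int) then
    none
  else
    pvLoopA motif current_abs lo_abs hi_abs (d + 1)
termination_by ((current_abs - lo_abs).toNat + (hi_abs - current_abs).toNat + 1) - d
decreasing_by
  rename_i _ _ h3
  apply Nat.sub_succ_lt_self
  apply Nat.lt_succ_of_le
  rcases not_and_or.mp h3 with h' | h'
  · exact Nat.le_of_lt (Nat.lt_of_lt_of_le
      (Int.lt_toNat.mpr (lt_sub_iff_add_lt.mpr (by rw [add_comm]; exact lt_sub_iff_add_lt.mp (not_le.mp h'))))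
      (Nat.le_add_right _ _))
  · exact Nat.le_of_lt (Nat.lt_of_lt_of_le
      (Int.lt_toNat.mpr (lt_sub_iff_add_lt.mpr (by rw [add_comm]; exact not_le.mp h')))
      (Nat.le_add_left _ _))

def nearest_motif_unbounded_py (seq : String) (interval_start : Int) (current_abs : Int) (role : String) (strand : String) (lo_abs : Int) (hi_abs : Int) : Option Int :=
  let L : Int := PySem.Str.len seq
  let lo : Int := if role == "first_end" then max lo_abs interval_start else max lo_abs (interval_start + 2)
  let hi : Int := if role == "first_end" then min hi_abs (interval_start + L - 2) else min hi_abs (interval_start + L)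
  if lo > hi then none
  else pvLoopA (fun p => pvHasBoundaryMotif seq interval_start p role strand) current_abs lo hi 0

-- ===== PORT B =====
-- _scan_left: first motif position scanning downward from p to lo_abs
def pvScanLeft (motif : Int → Bool) (lo_abs p : Int) : Option Int :=
  if p < lo_abs then none
  else if motif p = true then some p
  else pvScanLeft motif lo_abs (p - 1)
termination_by (p - lo_abs + 1).toNat
decreasing_by
  rename_i h _
  rw [sub_right_comm, sub_add_cancel]
  exact (Int.toNat_lt_toNat (Int.lt_add_one_iff.mpr (sub_nonneg.mpr (not_lt.mp h)))).mpr (lt_add_one _)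

-- _scan_right: first motif position scanning upward from p to hi_abs
def pvScanRight (motif : Int → Bool) (hi_abs p : Int) : Option Int :=
  if hi_abs < p then none
  else if motif p = true then some p
  else pvScanRight motif hi_abs (p + 1)
termination_by (hi_abs - p + 1).toNat
decreasing_by
  rename_i h _
  rw [sub_add_eq_sub_sub, sub_add_cancel]
  exact (Int.toNat_lt_toNat (Int.lt_add_one_iff.mpr (sub_nonneg.mpr (not_lt.mp h)))).mpr (lt_add_one _)

-- _pick: combine the two candidates, tie to the left
def pvPick (current_abs : Int) : Option Int → Option Int → Option Int
  | none, r => r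
  | some pl, none => some pl
  | some pl, some pr => if current_abs - pl ≤ pr - current_abs then some pl else some pr

def nearest_motif_unbounded_py_alt (seq : String) (interval_start : Int) (current_abs : Int) (role : String) (strand : String) (lo_abs : Int) (hi_abs : Int) : Option Int :=
  let L : Int := PySem.Str.len seq
  let lo : Int := if role == "first_end" then max lo_abs interval_start else max lo_abs (interval_start + 2)
  let hi : Int := if role == "first_end" then min hi_abs (interval_start + L - 2) else min hi_abs (interval_start + L)
  if lo > hi then none
  else
    let motif := fun p => pvHasBoundaryMotif seq interval_start p role strand
    pvPick current_abs (pvScanLeft motif lo (min current_abs hi))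
      (pvScanRight motif hi (max (current_abs + 1) lo))

-- ===== PRECONDITION & SPEC =====
def Spec_nearest_motif_unbounded_py (seq : String) (interval_start : Int) (current_abs : Int) (role : String) (strand : String) (lo_abs : Int) (hi_abs : Int) (out : Option Int) : Prop := out = nearest_motif_unbounded_py_alt seq interval_start current_abs role strand lo_abs hi_abs
instance (seq : String) (interval_start : Int) (current_abs : Int) (role : String) (strand : String) (lo_abs : Int) (hi_abs : Int) (out : Option Int) : Decidable (Spec_nearest_motif_unbounded_py seq interval_start current_abs role strand lo_abs hi_abs out) := by unfold Spec_nearest_motif_unbounded_py; infer_instance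

-- ===== CLAIM (what is proved, stated in full; the proofs are below) =====
def Claim_equal_nearest_motif_unbounded_py : Prop := ∀ (seq : String) (interval_start : Int) (current_abs : Int) (role : String) (strand : String) (lo_abs : Int) (hi_abs : Int), Dom_nearest_motif_unbounded_py seq interval_start current_abs role strand lo_abs hi_abs → Spec_nearest_motif_unbounded_py seq interval_start current_abs role strand lo_abs hi_abs (nearest_motif_unbounded_py seq interval_start current_abs role strand lo_abs hi_abs)

-- ===== LEMMAS AND PROOFS =====

theorem pvScanLeft_le {motif : Int → Bool} {lo p q : Int} (h : pvScanLeft motif lo p = some q) : q ≤ p := by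
  rw [pvScanLeft] at h
  split_ifs at h with h1 h2
  · exact le_of_eq (Option.some.inj h).symm
  · have := pvScanLeft_le h; omega
termination_by (p - lo + 1).toNat
decreasing_by omega

theorem pvScanRight_ge {motif : Int → Bool} {hi p q : Int} (h : pvScanRight motif hi p = some q) : p ≤ q := by
  rw [pvScanRight] at h
  split_ifs at h with h1 h2
  · exact le_of_eq (Option.some.inj h)
  · have := pvScanRight_ge h; omega
termination_by (hi - p + 1).toNat
decreasing_by omega

theorem pvScanLeft_none {motif : Int → Bool} {lo p : Int} (h : p < lo) : pvScanLeft motif lo p = none := by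
  rw [pvScanLeft]; simp [h]

theorem pvScanRight_none {motif : Int → Bool} {hi p : Int} (h : hi < p) : pvScanRight motif hi p = none := by
  rw [pvScanRight]; simp [h]

theorem pvScanLeft_hit {motif : Int → Bool} {lo p : Int} (h1 : lo ≤ p) (h2 : motif p = true) :
    pvScanLeft motif lo p = some p := by
  rw [pvScanLeft]; simp [h2]; omega

theorem pvScanRight_hit {motif : Int → Bool} {hi p : Int} (h1 : p ≤ hi) (h2 : motif p = true) :
    pvScanRight motif hi p = some p := by
  rw [pvScanRight]; simp [h2]; omega

theorem pvScanLeft_miss {motif : Int → Bool} {lo p : Int} (h1 : lo ≤ p) (h2 : motif p = false) :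
    pvScanLeft motif lo p = pvScanLeft motif lo (p - 1) := by
  rw [pvScanLeft]; simp [h2]; omega

theorem pvScanRight_miss {motif : Int → Bool} {hi p : Int} (h1 : p ≤ hi) (h2 : motif p = false) :
    pvScanRight motif hi p = pvScanRight motif hi (p + 1) := by
  rw [pvScanRight]; simp [h2]; omega

-- the left scan's starting point may slide down past already-rejected/out-of-window positions
theorem pvScanLeft_step (motif : Int → Bool) (c lo hi : Int) (d : Int)
    (hno : ¬ (lo ≤ c - d ∧ c - d ≤ hi ∧ motif (c - d) = true)) :
    pvScanLeft motif lo (min (c - d) hi) = pvScanLeft motif lo (min (c - d - 1) hi) := by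
  rcases le_or_gt (c - d) hi with hle | hgt
  · rw [min_eq_left hle, min_eq_left (by omega)]
    rcases lt_or_ge (c - d) lo with hlt | hge
    · rw [pvScanLeft_none hlt, pvScanLeft_none (by omega)]
    · have hm : motif (c - d) = false := by
        cases hmv : motif (c - d)
        · rfl
        · exact absurd ⟨hge, hle, hmv⟩ hno
      exact pvScanLeft_miss hge hm
  · rw [min_eq_right (le_of_lt hgt), min_eq_right (by omega)]

theorem pvScanRight_step (motif : Int → Bool) (c lo hi : Int) (d : Int)
    (hno : ¬ (lo ≤ c + d ∧ c + d ≤ hi ∧ motif (c + d) = true)) :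
    pvScanRight motif hi (max (c + d) lo) = pvScanRight motif hi (max (c + d + 1) lo) := by
  rcases le_or_gt lo (c + d) with hge | hlt
  · rw [max_eq_left hge, max_eq_left (by omega)]
    rcases lt_or_ge hi (c + d) with hgt | hle
    · rw [pvScanRight_none hgt, pvScanRight_none (by omega)]
    · have hm : motif (c + d) = false := by
        cases hmv : motif (c + d)
        · rfl
        · exact absurd ⟨hge, hle, hmv⟩ hno
      exact pvScanRight_miss hle hm
  · rw [max_eq_right (le_of_lt hlt), max_eq_right (by omega)]

-- main invariant: from step d ≥ 1 on, A's ring loop computes B's pick of the two scans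
theorem pvLoop_eq (motif : Int → Bool) (c lo hi : Int) (hlohi : lo ≤ hi) (d : Nat) (hd : 1 ≤ d) :
    pvLoopA motif c lo hi d =
      pvPick c (pvScanLeft motif lo (min (c - (d : Int)) hi))
        (pvScanRight motif hi (max (c + (d : Int)) lo)) := by
  rw [pvLoopA]
  split_ifs with h1 h2 h3
  · -- left hit at distance d
    obtain ⟨ha, hb, hm⟩ := h1
    rw [min_eq_left hb, pvScanLeft_hit ha hm]
    cases hr : pvScanRight motif hi (max (c + (d : Int)) lo) with
    | none => simp [pvPick]
    | some pr =>
        have hge := pvScanRight_ge hr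
        have : c - (c - (d : Int)) ≤ pr - c := by
          have : max (c + (d : Int)) lo ≤ pr := hge
          omega
        simp only [pvPick]
        rw [if_pos (by omega)]
  · -- right hit at distance d (d ≠ 0)
    obtain ⟨-, ha, hb, hm⟩ := h2
    rw [max_eq_left ha, pvScanRight_hit hb hm]
    cases hl : pvScanLeft motif lo (min (c - (d : Int)) hi) with
    | none => simp [pvPick]
    | some pl =>
        have hlt : pl < c - (d : Int) := by
          rcases le_or_gt (c - (d : Int)) hi with hle | hgt
          · rw [min_eq_left hle] at hl
            rcases lt_or_ge (c - (d : Int)) lo with hlt' | hge'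
            · rw [pvScanLeft_none hlt'] at hl; exact absurd hl (by simp)
            · have hm' : motif (c - (d : Int)) = false := by
                cases hmv : motif (c - (d : Int))
                · rfl
                · exact absurd ⟨hge', hle, hmv⟩ h1
              rw [pvScanLeft_miss hge' hm'] at hl
              have := pvScanLeft_le hl
              omega
          · rw [min_eq_right (le_of_lt hgt)] at hl
            have := pvScanLeft_le hl
            omega
        simp only [pvPick]
        rw [if_neg (by omega)]
  · -- stop: both scans empty
    obtain ⟨ha, hb⟩ := h3
    have hl : pvScanLeft motif lo (min (c - (d : Int)) hi) = none := by
      rcases lt_or_ge (c - (d : Int)) lo with hlt | hge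
      · exact pvScanLeft_none (by omega)
      · have heq : c - (d : Int) = lo := by omega
        have hm : motif (c - (d : Int)) = false := by
          cases hmv : motif (c - (d : Int))
          · rfl
          · exact absurd ⟨hge, by omega, hmv⟩ h1
        rw [min_eq_left (by omega), pvScanLeft_miss hge hm, pvScanLeft_none (by omega)]
    have hr : pvScanRight motif hi (max (c + (d : Int)) lo) = none := by
      rcases lt_or_ge hi (c + (d : Int)) with hgt | hle
      · exact pvScanRight_none (by omega)
      · have heq : c + (d : Int) = hi := by omega
        have hm : motif (c + (d : Int)) = false := by
          cases hmv : motif (c + (d : Int))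
          · rfl
          · exact absurd ⟨by omega, by omega, hle, hmv⟩ h2
        rw [max_eq_left (by omega), pvScanRight_miss hle hm, pvScanRight_none (by omega)]
    rw [hl, hr]; rfl
  · -- no hit, no stop: recurse
    rw [pvLoop_eq motif c lo hi hlohi (d + 1) (by omega)]
    have hl := pvScanLeft_step motif c lo hi (d : Int) h1
    have hr : pvScanRight motif hi (max (c + (d : Int)) lo) = pvScanRight motif hi (max (c + (d : Int) + 1) lo) := by
      apply pvScanRight_step
      intro hcon
      exact h2 ⟨by omega, hcon⟩
    push_cast
    rw [show c - ((d : Int) + 1) = c - (d : Int) - 1 from by ring,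
        show c + ((d : Int) + 1) = c + (d : Int) + 1 from by ring, ← hl, ← hr]
termination_by ((c - lo).toNat + (hi - c).toNat + 1) - d
decreasing_by
  push Not at h3
  omega

theorem pvLoop_zero (motif : Int → Bool) (c lo hi : Int) (hlohi : lo ≤ hi) :
    pvLoopA motif c lo hi 0 =
      pvPick c (pvScanLeft motif lo (min c hi)) (pvScanRight motif hi (max (c + 1) lo)) := by
  rw [pvLoopA]
  simp only [Nat.cast_zero, sub_zero, add_zero, ne_eq, not_true_eq_false, false_and, if_false]
  split_ifs with h1 h3
  · obtain ⟨ha, hb, hm⟩ := h1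
    rw [min_eq_left hb, pvScanLeft_hit ha hm]
    cases hr : pvScanRight motif hi (max (c + 1) lo) with
    | none => simp [pvPick]
    | some pr =>
        have hge := pvScanRight_ge hr
        simp only [pvPick]
        rw [if_pos (by omega)]
  · obtain ⟨ha, hb⟩ := h3
    have hl : pvScanLeft motif lo (min c hi) = none := by
      have heq : c = lo := by omega
      have hm : motif c = false := by
        cases hmv : motif c
        · rfl
        · exact absurd ⟨by omega, by omega, hmv⟩ h1
      rw [min_eq_left (by omega), pvScanLeft_miss (by omega) hm, pvScanLeft_none (by omega)]
    have hr : pvScanRight motif hi (max (c + 1) lo) = none := by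
      exact pvScanRight_none (by omega)
    rw [hl, hr]; rfl
  · rw [pvLoop_eq motif c lo hi hlohi 1 (le_refl 1)]
    have hl : pvScanLeft motif lo (min c hi) = pvScanLeft motif lo (min (c - 1) hi) := by
      have := pvScanLeft_step motif c lo hi 0 (by simpa using h1)
      simpa using this
    rw [hl]
    norm_num

theorem nearest_motif_unbounded_py_spec : Claim_equal_nearest_motif_unbounded_py := by
  intro seq interval_start current_abs role strand lo_abs hi_abs _
  unfold Spec_nearest_motif_unbounded_py
  unfold nearest_motif_unbounded_py nearest_motif_unbounded_py_alt
  simp only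
  split_ifs with h1 h2 h3
  · rfl
  · exact pvLoop_zero _ current_abs _ _ (by omega)
  · rfl
  · exact pvLoop_zero _ current_abs _ _ (by omega)
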